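-- pv_equiv track=rewrite | github.com/Turing551/CodeJam | Saving The Universe Again/solution.py | solution
-- ===== SOURCE A (Python) =====
-- def solution(n):
--   a=0
--   b=1
--   for j in range(len(n)):
--     if n[j] == 'S':
--       a=a+b
--     elif n[j] == 'C':
--       b=b*2
--   return a
-- ===== SOURCE B (Python) =====
-- def solution(n):
--   return sum(seg.count('S') * 2**i for i, seg in enumerate(n.split('C')))
-- ===== Notes on version B (the rewrite author's own statement) =====
-- stated objective: faster
-- what changed: Replaces the running-weight character-by-character scan carrying (a, b) state with a split-on-'C' grouping: segment i of n.split('C') contributes count('S') * 2**i, summed in one comprehension.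
import Mathlib
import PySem

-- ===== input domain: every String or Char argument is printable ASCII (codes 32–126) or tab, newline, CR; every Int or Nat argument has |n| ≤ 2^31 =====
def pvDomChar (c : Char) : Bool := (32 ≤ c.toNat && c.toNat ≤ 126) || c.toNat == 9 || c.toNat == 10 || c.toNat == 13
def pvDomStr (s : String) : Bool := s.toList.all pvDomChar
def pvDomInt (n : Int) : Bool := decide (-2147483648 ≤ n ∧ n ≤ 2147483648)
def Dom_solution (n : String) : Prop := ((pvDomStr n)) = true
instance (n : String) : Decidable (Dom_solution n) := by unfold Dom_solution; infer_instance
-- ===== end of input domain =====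

-- B groups the string by splitting on 'C' and tallies 'S' counts with weight 2^i per segment,
-- instead of A's single scan carrying a running weight (same O(n) work; a timing run measured B faster, as split/count run in C).

-- ===== PORT A =====
-- for j in range(len(n)): if n[j]=='S': a+=b elif n[j]=='C': b*=2  — state (a, b)
def solution (n : String) : Int :=
  (PySem.List.pyRange 0 (PySem.Str.len n) 1).foldl
    (fun (ab : Int × Int) j =>
      -- n[j]; j always in range here, so pyGetD's default is never used
      if PySem.List.pyGetD n.toList j ' ' == 'S' then (ab.1 + ab.2, ab.2)
      else if PySem.List.pyGetD n.toList j ' ' == 'C' then (ab.1, ab.2 * 2)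
      else ab)
    (0, 1) |>.1

-- ===== PORT B =====
-- sum(seg.count('S') * 2**i for i, seg in enumerate(n.split('C')))
def solution_alt (n : String) : Int :=
  ((PySem.List.enumerate (PySem.Chars.splitOn n.toList ['C']) 0).map
    (fun p => (p.2.count 'S' : Int) * 2 ^ p.1.toNat)).sum

-- ===== PRECONDITION & SPEC =====
def Spec_solution (n : String) (out : Int) : Prop := out = solution_alt n
instance (n : String) (out : Int) : Decidable (Spec_solution n out) := by unfold Spec_solution; infer_instance

-- ===== CLAIM (what is proved, stated in full; the proofs are below) =====
def Claim_equal_solution : Prop := ∀ (n : String), Dom_solution n → Spec_solution n (solution n)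

-- ===== LEMMAS AND PROOFS =====

-- reference splitter: split a char list on 'C', with `cur` the reversed current segment
def myspl (cur : List Char) : List Char → List (List Char)
  | [] => [cur.reverse]
  | c :: rest => if c = 'C' then cur.reverse :: myspl [] rest else myspl (c :: cur) rest

-- Horner form of B's weighted sum
def gval : List (List Char) → Int
  | [] => 0
  | s :: rest => (s.count 'S' : Int) + 2 * gval rest

lemma splitOn_go_eq : ∀ (fuel : Nat) (l cur : List Char) (acc : List (List Char)),
    l.length ≤ fuel →
    PySem.Chars.splitOn.go ['C'] fuel l cur acc = acc.reverse ++ myspl cur l := by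
  intro fuel
  induction fuel with
  | zero =>
    intro l cur acc h
    have : l = [] := List.length_eq_zero_iff.mp (Nat.le_zero.mp h)
    subst this
    simp [PySem.Chars.splitOn.go, myspl]
  | succ f ih =>
    intro l cur acc h
    cases l with
    | nil => simp [PySem.Chars.splitOn.go, myspl]
    | cons c rest =>
      by_cases hc : c = 'C'
      · subst hc
        rw [show PySem.Chars.splitOn.go ['C'] (f+1) ('C' :: rest) cur acc
              = PySem.Chars.splitOn.go ['C'] f rest [] (cur.reverse :: acc) by
            simp [PySem.Chars.splitOn.go, List.isPrefixOf]]
        rw [ih rest [] _ (by simpa using Nat.lt_succ_iff.mp (by simpa using h))]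
        simp [myspl]
      · rw [show PySem.Chars.splitOn.go ['C'] (f+1) (c :: rest) cur acc
              = PySem.Chars.splitOn.go ['C'] f rest (c :: cur) acc by
            simp [PySem.Chars.splitOn.go, List.isPrefixOf]
            exact fun h => absurd h.symm hc]
        rw [ih rest (c :: cur) acc (by simpa using Nat.lt_succ_iff.mp (by simpa using h))]
        simp [myspl, hc]

lemma splitOn_eq_myspl (l : List Char) : PySem.Chars.splitOn l ['C'] = myspl [] l := by
  rw [PySem.Chars.splitOn, splitOn_go_eq (l.length + 1) l [] [] (Nat.le_succ _)]
  simp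

lemma gval_myspl (l cur : List Char) : gval (myspl cur l) = (cur.count 'S' : Int) + gval (myspl [] l) := by
  induction l generalizing cur with
  | nil => simp [myspl, gval]
  | cons c rest ih =>
    by_cases hc : c = 'C'
    · subst hc; simp [myspl, gval]
    · simp only [myspl, if_neg hc]
      rw [ih (c :: cur), ih [c]]
      by_cases hs : c = 'S' <;> simp [hs, List.count_cons] <;> ring

-- B's enumerate-sum is 2^k times the Horner value
lemma sum_enum (segs : List (List Char)) : ∀ (k : Nat),
    ((PySem.List.enumerate segs (k : Int)).map
      (fun p => (p.2.count 'S' : Int) * 2 ^ p.1.toNat)).sum = 2 ^ k * gval segs := by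
  induction segs with
  | nil => intro k; simp [PySem.List.enumerate_nil, gval]
  | cons s rest ih =>
    intro k
    rw [PySem.List.enumerate_cons]
    have : ((k : Int) + 1) = ((k + 1 : Nat) : Int) := by push_cast; ring
    simp only [List.map_cons, List.sum_cons, this, ih (k + 1), gval]
    have hk : ((k : Int)).toNat = k := Int.toNat_natCast k
    rw [hk, pow_succ]
    ring

-- A's loop over the characters computes the Horner value of the split
lemma loop_eq (l : List Char) : ∀ (a b : Int),
    (l.foldl
      (fun (ab : Int × Int) c =>
        if c == 'S' then (ab.1 + ab.2, ab.2)
        else if c == 'C' then (ab.1, ab.2 * 2)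
        else ab)
      (a, b)).1 = a + b * gval (myspl [] l) := by
  induction l with
  | nil => intro a b; simp [myspl, gval]
  | cons c rest ih =>
    intro a b
    by_cases hs : c = 'S'
    · subst hs
      simp only [List.foldl_cons, if_pos (by decide : ('S' == 'S') = true)]
      rw [ih (a + b) b]
      simp [myspl, gval_myspl rest ['S']]
      ring
    · by_cases hc : c = 'C'
      · subst hc
        simp only [List.foldl_cons]
        rw [if_neg (by decide), if_pos (by decide : ('C' == 'C') = true)]
        rw [ih a (b * 2)]
        simp [myspl, gval]
        ring
      · simp only [List.foldl_cons]
        rw [if_neg (by simpa using hs), if_neg (by simpa using hc)]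
        rw [ih a b]
        simp only [myspl, if_neg hc]
        rw [gval_myspl rest [c], gval_myspl rest []]
        simp [hs]

-- A's pyRange-indexed fold is the fold over the characters themselves
lemma range_fold_eq (n : String) (F : Int × Int → Char → Int × Int) (init : Int × Int) :
    (PySem.List.pyRange 0 (PySem.Str.len n) 1).foldl
      (fun ab j => F ab (PySem.List.pyGetD n.toList j ' ')) init
    = n.toList.foldl F init := by
  have h := PySem.List.enumerate_eq_map_pyRange n.toList ' '
  have hlen : PySem.Str.len n = PySem.List.len n.toList := by
    simp [PySem.Str.len, PySem.List.len]
  calc (PySem.List.pyRange 0 (PySem.Str.len n) 1).foldl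
        (fun ab j => F ab (PySem.List.pyGetD n.toList j ' ')) init
      = ((PySem.List.pyRange 0 (PySem.List.len n.toList) 1).map
          (fun j => (j, PySem.List.pyGetD n.toList j ' '))).foldl
          (fun ab p => F ab p.2) init := by rw [hlen, List.foldl_map]
    _ = (PySem.List.enumerate n.toList 0).foldl (fun ab p => F ab p.2) init := by rw [← h]
    _ = ((PySem.List.enumerate n.toList 0).map (·.2)).foldl F init := by rw [List.foldl_map]
    _ = n.toList.foldl F init := by rw [PySem.List.map_snd_enumerate]

-- ===== VERDICT (by name: the statement is the Claim_ definition above) =====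
theorem solution_spec : Claim_equal_solution := by
  intro n _
  unfold Spec_solution solution solution_alt
  rw [range_fold_eq n (fun ab c =>
        if c == 'S' then (ab.1 + ab.2, ab.2)
        else if c == 'C' then (ab.1, ab.2 * 2)
        else ab) (0, 1), loop_eq n.toList 0 1, splitOn_eq_myspl]
  have := sum_enum (myspl [] n.toList) 0
  simpa using this.symm
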